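-- pv_equiv track=rewrite | github.com/desihub/desici | py/desici/DESI-5095-v3/B4toCSV.py | getGuideEnd
-- ===== SOURCE A (Python) =====
-- def getGuideEnd(string):
--     # finds location of the end of the guide number
--     slen = len(string)
--     if slen<1:
--         return -0
--     i = 0
--     while (i<slen) and not string[i].isdigit():
--         i += 1
--     while (i<slen) and string[i].isdigit():
--         i += 1
--     return i
-- ===== SOURCE B (Python) =====
-- def getGuideEnd(string):
--     # single pass with a flag: return the first index where a digit run ends,
--     # or len(string) if the string ends inside (or before) the run
--     seen_digit = False
--     for i, c in enumerate(string):
--         if c.isdigit():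
--             seen_digit = True
--         elif seen_digit:
--             return i
--     return len(string)
-- ===== Notes on version B (the rewrite author's own statement) =====
-- stated objective: simpler
-- what changed: Replaced A's two index-based while-loops (skip non-digits, then consume digits) by one enumerate pass with a seen_digit flag that returns at the first non-digit after a digit.
import Mathlib
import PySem

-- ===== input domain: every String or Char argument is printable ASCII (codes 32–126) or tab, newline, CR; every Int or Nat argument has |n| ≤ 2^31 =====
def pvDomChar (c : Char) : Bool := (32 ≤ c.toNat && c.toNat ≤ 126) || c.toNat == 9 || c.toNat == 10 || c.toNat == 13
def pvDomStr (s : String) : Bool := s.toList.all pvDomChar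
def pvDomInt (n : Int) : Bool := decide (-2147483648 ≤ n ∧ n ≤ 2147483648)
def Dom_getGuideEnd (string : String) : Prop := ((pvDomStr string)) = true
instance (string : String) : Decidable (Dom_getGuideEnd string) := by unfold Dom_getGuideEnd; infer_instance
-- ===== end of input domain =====

-- B replaces A's two index-based while loops by a single pass with a seen-digit flag (objective: simpler).

-- ===== PORT A =====
-- first while loop: skip non-digit characters
def getGuideEndLoop1 (cs : List Char) (slen : Nat) (i : Nat) : Nat :=
  if i < slen ∧ ¬ (PySem.Chars.isdigit (cs.getD i ' ')) then
    getGuideEndLoop1 cs slen (i + 1)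
  else i
termination_by slen - i
decreasing_by omega

-- second while loop: consume digit characters
def getGuideEndLoop2 (cs : List Char) (slen : Nat) (i : Nat) : Nat :=
  if i < slen ∧ PySem.Chars.isdigit (cs.getD i ' ') then
    getGuideEndLoop2 cs slen (i + 1)
  else i
termination_by slen - i
decreasing_by omega

def getGuideEnd (string : String) : Int :=
  let cs := string.toList
  let slen := cs.length
  if slen < 1 then 0
  else (getGuideEndLoop2 cs slen (getGuideEndLoop1 cs slen 0) : Int)

-- ===== PORT B =====
-- the for-loop over enumerate(string) with the seen_digit flag and early return
def getGuideEndAltGo (cs : List Char) (i : Int) (seen : Bool) (slen : Int) : Int :=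
  match cs with
  | [] => slen
  | c :: rest =>
    if PySem.Chars.isdigit c then getGuideEndAltGo rest (i + 1) true slen
    else if seen then i
    else getGuideEndAltGo rest (i + 1) seen slen

def getGuideEnd_alt (string : String) : Int :=
  getGuideEndAltGo string.toList 0 false (PySem.Str.len string)

-- ===== PRECONDITION & SPEC =====
def Spec_getGuideEnd (string : String) (out : Int) : Prop := out = getGuideEnd_alt string
instance (string : String) (out : Int) : Decidable (Spec_getGuideEnd string out) := by unfold Spec_getGuideEnd; infer_instance

-- ===== CLAIM (what is proved, stated in full; the proofs are below) =====
def Claim_equal_getGuideEnd : Prop := ∀ (string : String), Dom_getGuideEnd string → Spec_getGuideEnd string (getGuideEnd string)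

-- ===== LEMMAS AND PROOFS =====

theorem loop1_aux (cs : List Char) (n : Nat) : ∀ (i : Nat), cs.length - i = n → i ≤ cs.length →
    getGuideEndLoop1 cs cs.length i
      = i + ((cs.drop i).takeWhile (fun c => !PySem.Chars.isdigit c)).length := by
  induction n with
  | zero =>
    intro i h0 hle
    have hi : i = cs.length := by omega
    rw [getGuideEndLoop1]
    simp [hi]
  | succ n ih =>
    intro i h0 hle
    have hlt : i < cs.length := by omega
    have hdrop : cs.drop i = cs[i] :: cs.drop (i + 1) := List.drop_eq_getElem_cons hlt
    have hgetD : cs.getD i ' ' = cs[i] := List.getD_eq_getElem cs ' ' hlt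
    rw [getGuideEndLoop1]
    by_cases hd : PySem.Chars.isdigit cs[i]
    · have htw : ((cs.drop i).takeWhile (fun c => !PySem.Chars.isdigit c)) = [] := by
        rw [hdrop, List.takeWhile_cons]
        simp [hd]
      rw [if_neg (fun hc => hc.2 (by rw [hgetD]; exact hd)), htw]
      simp
    · have htw : ((cs.drop i).takeWhile (fun c => !PySem.Chars.isdigit c))
          = cs[i] :: ((cs.drop (i + 1)).takeWhile (fun c => !PySem.Chars.isdigit c)) := by
        rw [hdrop, List.takeWhile_cons]
        simp [hd]
      rw [if_pos ⟨hlt, by rw [hgetD]; simp [hd]⟩, ih (i + 1) (by omega) (by omega), htw]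
      simp
      omega

theorem loop2_aux (cs : List Char) (n : Nat) : ∀ (i : Nat), cs.length - i = n → i ≤ cs.length →
    getGuideEndLoop2 cs cs.length i
      = i + ((cs.drop i).takeWhile (fun c => PySem.Chars.isdigit c)).length := by
  induction n with
  | zero =>
    intro i h0 hle
    have hi : i = cs.length := by omega
    rw [getGuideEndLoop2]
    simp [hi]
  | succ n ih =>
    intro i h0 hle
    have hlt : i < cs.length := by omega
    have hdrop : cs.drop i = cs[i] :: cs.drop (i + 1) := List.drop_eq_getElem_cons hlt
    have hgetD : cs.getD i ' ' = cs[i] := List.getD_eq_getElem cs ' ' hlt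
    rw [getGuideEndLoop2]
    by_cases hd : PySem.Chars.isdigit cs[i]
    · have htw : ((cs.drop i).takeWhile (fun c => PySem.Chars.isdigit c))
          = cs[i] :: ((cs.drop (i + 1)).takeWhile (fun c => PySem.Chars.isdigit c)) := by
        rw [hdrop, List.takeWhile_cons]
        simp [hd]
      rw [if_pos ⟨hlt, by rw [hgetD]; exact hd⟩, ih (i + 1) (by omega) (by omega), htw]
      simp
      omega
    · have htw : ((cs.drop i).takeWhile (fun c => PySem.Chars.isdigit c)) = [] := by
        rw [hdrop, List.takeWhile_cons]
        simp only [Bool.not_eq_true] at hd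
        simp [hd]
      rw [if_neg (fun hc => hd (by rw [← hgetD]; exact hc.2)), htw]
      simp

theorem loop1_eq (cs : List Char) (i : Nat) (h : i ≤ cs.length) :
    getGuideEndLoop1 cs cs.length i
      = i + ((cs.drop i).takeWhile (fun c => !PySem.Chars.isdigit c)).length :=
  loop1_aux cs (cs.length - i) i rfl h

theorem loop2_eq (cs : List Char) (i : Nat) (h : i ≤ cs.length) :
    getGuideEndLoop2 cs cs.length i
      = i + ((cs.drop i).takeWhile (fun c => PySem.Chars.isdigit c)).length :=
  loop2_aux cs (cs.length - i) i rfl h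

theorem altGo_true (cs : List Char) (i slen : Int) (h : slen = i + cs.length) :
    getGuideEndAltGo cs i true slen
      = i + ((cs.takeWhile (fun c => PySem.Chars.isdigit c)).length : Int) := by
  induction cs generalizing i with
  | nil => simp [getGuideEndAltGo, h]
  | cons c rest ih =>
    by_cases hd : PySem.Chars.isdigit c
    · have := ih (i + 1) (by simp at h ⊢; omega)
      simp [getGuideEndAltGo, hd, this, List.takeWhile]
      omega
    · simp [getGuideEndAltGo, hd, List.takeWhile]

theorem altGo_false (cs : List Char) (i slen : Int) (h : slen = i + cs.length) :
    getGuideEndAltGo cs i false slen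
      = i + ((cs.takeWhile (fun c => !PySem.Chars.isdigit c)).length : Int)
          + (((cs.dropWhile (fun c => !PySem.Chars.isdigit c)).takeWhile
                (fun c => PySem.Chars.isdigit c)).length : Int) := by
  induction cs generalizing i with
  | nil => simp [getGuideEndAltGo, h]
  | cons c rest ih =>
    by_cases hd : PySem.Chars.isdigit c
    · have := altGo_true rest (i + 1) slen (by simp at h ⊢; omega)
      simp [getGuideEndAltGo, hd, this, List.takeWhile, List.dropWhile]
      omega
    · have := ih (i + 1) (by simp at h ⊢; omega)
      simp [getGuideEndAltGo, hd, this, List.takeWhile, List.dropWhile]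
      omega

theorem drop_takeWhile_len (cs : List Char) (p : Char → Bool) :
    cs.drop (cs.takeWhile p).length = cs.dropWhile p := by
  induction cs with
  | nil => simp
  | cons c rest ih =>
    by_cases h : p c <;> simp [List.takeWhile, List.dropWhile, h, ih]

-- ===== VERDICT (by name: the statement is the Claim_ definition above) =====
theorem getGuideEnd_spec : Claim_equal_getGuideEnd := by
  intro s _
  unfold Spec_getGuideEnd getGuideEnd getGuideEnd_alt
  set cs := s.toList with hcs
  have hlen : PySem.Str.len s = (cs.length : Int) := by
    simp [PySem.Str.len, PySem.Chars.len, hcs]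
  have hB := altGo_false cs 0 (cs.length : Int) (by simp)
  by_cases h0 : cs.length < 1
  · have hnil : cs = [] := List.eq_nil_of_length_eq_zero (by omega)
    rw [hlen, hnil]
    simp [getGuideEndAltGo]
  · have h1 := loop1_eq cs 0 (by omega)
    have hle : ((cs.takeWhile (fun c => !PySem.Chars.isdigit c)).length) ≤ cs.length :=
      (List.takeWhile_prefix _).length_le
    have h2 := loop2_eq cs ((cs.takeWhile (fun c => !PySem.Chars.isdigit c)).length) hle
    rw [drop_takeWhile_len] at h2
    simp only [h0, if_false, hlen, hB]
    simp at h1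
    rw [h1, h2]
    push_cast
    ring
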